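-- pv_equiv track=rewrite | github.com/fjnkt98/competitive_python | 235.py | enumerate_dividers
-- ===== SOURCE A (Python) =====
-- from typing import List
-- from math import trunc, sqrt
--
-- def enumerate_dividers(x: int) -> List[int]:
--     result: List[int] = []
--
--     for i in range(1, trunc(sqrt(x)) + 1):
--         if x % i == 0:
--             result.append(i)
--
--             if x // i != i:
--                 result.append(x // i)
--
--     result.sort()
--
--     return result
-- ===== SOURCE B (Python) =====
-- from typing import List
--
-- def enumerate_dividers(x: int) -> List[int]:
--     # Prime-factorize x, then build all divisors as products of prime powers (no trial
--     # division over the whole 1..sqrt(x) range, no pair collection).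
--     if x == 0:
--         return []
--     divs: List[int] = [1]
--     n = x
--     p = 2
--     while p * p <= n:
--         if n % p == 0:
--             e = 0
--             while n % p == 0:
--                 n //= p
--                 e += 1
--             divs = [d * p ** k for d in divs for k in range(e + 1)]
--         p += 1
--     if n > 1:
--         divs = divs + [d * n for d in divs]
--     divs.sort()
--     return divs
-- ===== Notes on version B (the rewrite author's own statement) =====
-- stated objective: alternative
-- what changed: B prime-factorizes x by stripping each prime power in turn and generates the divisor list as products of prime powers (sorting once at the end), instead of A's trial division over every i in 1..trunc(sqrt(x)) collecting divisor pairs.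
import Mathlib
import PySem

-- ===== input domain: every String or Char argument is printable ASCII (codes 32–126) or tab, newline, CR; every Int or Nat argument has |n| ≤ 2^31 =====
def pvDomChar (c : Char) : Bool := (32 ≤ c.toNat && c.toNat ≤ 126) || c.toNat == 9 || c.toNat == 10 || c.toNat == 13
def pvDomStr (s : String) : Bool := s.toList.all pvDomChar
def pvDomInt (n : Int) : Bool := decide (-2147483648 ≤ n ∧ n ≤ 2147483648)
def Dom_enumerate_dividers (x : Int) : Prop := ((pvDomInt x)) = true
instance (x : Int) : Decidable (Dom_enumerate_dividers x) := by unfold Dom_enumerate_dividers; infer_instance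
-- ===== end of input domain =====

-- B prime-factorizes x and generates all divisors as products of prime powers instead of
-- A's trial division over all of 1..trunc(sqrt(x)) followed by sort() (objective: alternative).


-- ===== PORT A =====
-- trunc(sqrt(x)) is ported as Nat.sqrt x.toNat: exact for 0 ≤ x ≤ 2^31 (double sqrt is
-- correctly rounded and the gap to the next square exceeds the ulp there).
def enumerate_dividers (x : Int) : List Int :=
  let result : List Int :=
    (PySem.List.pyRange 1 ((Nat.sqrt x.toNat : Int) + 1) 1).foldl
      (fun result i =>
        if PySem.Int.mod x i = 0 then
          let result := result ++ [i]
          if PySem.Int.floordiv x i ≠ i then result ++ [PySem.Int.floordiv x i] else result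
        else result) []
  PySem.List.sorted result (fun y => y) false

-- ===== PORT B =====
-- pvStrip ports the inner loop 'while n % p == 0: n //= p; e += 1', returning (final n, e).
-- The fuel argument only makes the recursion total (structural on fuel); at every call site
-- fuel = n.toNat, which pvStrip_spec below shows is enough to run the loop to completion.
def pvStrip (fuel : Nat) (n p : Int) : Int × Int :=
  match fuel with
  | 0 => (n, 0)
  | fuel + 1 =>
    if PySem.Int.mod n p = 0 then
      let r := pvStrip fuel (PySem.Int.floordiv n p) p
      (r.1, r.2 + 1)
    else (n, 0)

-- pvFactorLoop ports the outer loop 'while p * p <= n: …; p += 1'; on n % p == 0 it strips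
-- the p-power and replaces divs by [d * p**k for d in divs for k in range(e+1)] (p**k ported
-- as p ^ k.toNat, exact since k ≥ 0).  The fuel argument only makes the recursion total; the
-- call site passes fuel = x.toNat, enough iterations by pvLoop_inv below.
def pvFactorLoop (fuel : Nat) (divs : List Int) (n p : Int) : List Int × Int :=
  match fuel with
  | 0 => (divs, n)
  | fuel + 1 =>
    if p * p ≤ n then
      if PySem.Int.mod n p = 0 then
        pvFactorLoop fuel
          (divs.flatMap (fun d =>
            (PySem.List.pyRange 0 ((pvStrip n.toNat n p).2 + 1) 1).map (fun k => d * p ^ k.toNat)))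
          (pvStrip n.toNat n p).1 (p + 1)
      else pvFactorLoop fuel divs n (p + 1)
    else (divs, n)

def enumerate_dividers_alt (x : Int) : List Int :=
  if x = 0 then []
  else
    let s := pvFactorLoop x.toNat [1] x 2
    let divs := if 1 < s.2 then s.1 ++ s.1.map (fun d => d * s.2) else s.1
    PySem.List.sorted divs (fun y => y) false

-- ===== PRECONDITION & SPEC =====
-- Pre_ excludes x < 0, where math.sqrt raises ValueError in A.
def Pre_enumerate_dividers (x : Int) : Prop := 0 ≤ x
instance (x : Int) : Decidable (Pre_enumerate_dividers x) := by unfold Pre_enumerate_dividers; infer_instance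
def pvWitness_enumerate_dividers : Int := (36)

def Spec_enumerate_dividers (x : Int) (out : List Int) : Prop := out = enumerate_dividers_alt x
instance (x : Int) (out : List Int) : Decidable (Spec_enumerate_dividers x out) := by unfold Spec_enumerate_dividers; infer_instance

-- ===== CLAIM (what is proved, stated in full; the proofs are below) =====
def Claim_equal_enumerate_dividers : Prop := ∀ (x : Int), Dom_enumerate_dividers x → Pre_enumerate_dividers x → Spec_enumerate_dividers x (enumerate_dividers x)

-- ===== LEMMAS AND PROOFS =====

theorem pvPrime_of_min (p n : Int) (hp : 2 ≤ p) (hdvd : p ∣ n)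
    (hmin : ∀ q : Int, 2 ≤ q → q < p → ¬ q ∣ n) : Prime p := by
  rw [Int.prime_iff_natAbs_prime, Nat.prime_def_lt]
  constructor
  · omega
  · intro m hm hmd
    have hmp : (m : Int) ∣ p := by
      have := Int.natCast_dvd_natCast.2 hmd
      rwa [Int.natAbs_of_nonneg (by omega : (0:Int) ≤ p)] at this
    by_contra hne
    have hm0 : m ≠ 0 := by
      rintro rfl
      simp at hmp
      omega
    have hm2 : 2 ≤ m := by omega
    exact hmin (m : Int) (by exact_mod_cast hm2) (by omega) (hmp.trans hdvd)

theorem pvResidual_prime (n p : Int) (hp : 2 ≤ p) (hn : 1 < n) (hsq : n < p * p)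
    (hmin : ∀ q : Int, 2 ≤ q → q < p → ¬ q ∣ n) : Prime n := by
  rw [Int.prime_iff_natAbs_prime, Nat.prime_def_lt]
  have hcast : (n.natAbs : Int) = n := Int.natAbs_of_nonneg (by omega)
  constructor
  · omega
  · intro m hm hmd
    by_contra hne
    have hm0 : m ≠ 0 := by rintro rfl; obtain ⟨c, hc⟩ := hmd; omega
    have hm2 : 2 ≤ m := by omega
    obtain ⟨c, hc⟩ := id hmd
    have hc2 : 2 ≤ c := by
      rcases Nat.lt_or_ge c 2 with h | h
      · interval_cases c <;> omega
      · exact h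
    -- one of m, c is a small divisor
    have hmdInt : (m : Int) ∣ n := by
      rw [← hcast]; exact_mod_cast hmd
    have hcdInt : (c : Int) ∣ n := by
      rw [← hcast]; exact_mod_cast (Dvd.intro m (by rw [hc, Nat.mul_comm]))
    rcases Nat.le_total m c with hmc | hcm
    · have : (m : Int) * m ≤ n := by
        rw [← hcast]; exact_mod_cast Nat.le_trans (Nat.mul_le_mul_left m hmc) (le_of_eq hc.symm)
      have hmp : (m : Int) < p := by nlinarith [this, hsq]
      exact hmin m (by exact_mod_cast hm2) hmp hmdInt
    · have : (c : Int) * c ≤ n := by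
        rw [← hcast]
        have : c * c ≤ m * c := Nat.mul_le_mul_right c hcm
        exact_mod_cast Nat.le_trans this (le_of_eq hc.symm)
      have hcp : (c : Int) < p := by nlinarith [this, hsq]
      exact hmin c (by exact_mod_cast hc2) hcp hcdInt

theorem pvSplit (m p : Int) (hp2 : 2 ≤ p) (hpr : Prime p) :
    ∀ (e : Nat) (d : Int), 0 < d → d ∣ m * p ^ e →
      ∃ (a : Int) (k : Nat), a ∣ m ∧ k ≤ e ∧ d = a * p ^ k := by
  intro e
  induction e with
  | zero =>
    intro d hd0 hdvd
    exact ⟨d, 0, by simpa using hdvd, le_refl 0, by ring⟩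
  | succ e ih =>
    intro d hd0 hdvd
    by_cases hpd : p ∣ d
    · obtain ⟨d', rfl⟩ := hpd
      have hd'0 : 0 < d' := by nlinarith
      have hd'dvd : d' ∣ m * p ^ e := by
        rw [← mul_dvd_mul_iff_right (show p ≠ 0 by omega)]
        have h1 : d' * p = p * d' := mul_comm _ _
        have h2 : m * p ^ e * p = m * p ^ (e + 1) := by rw [pow_succ]; ring
        rw [h1, h2]; exact hdvd
      obtain ⟨a, k, ha, hk, heq⟩ := ih d' hd'0 hd'dvd
      exact ⟨a, k + 1, ha, by omega, by rw [heq, pow_succ]; ring⟩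
    · have hco : IsCoprime d (p ^ (e + 1)) :=
        (((hpr.coprime_iff_not_dvd).2 hpd).symm).pow_right
      exact ⟨d, 0, hco.dvd_of_dvd_mul_right hdvd, by omega, by ring⟩

theorem pvPowInj (p : Int) (hp : 2 ≤ p) {k l : Nat} (h : p ^ k = p ^ l) : k = l := by
  rcases Nat.lt_trichotomy k l with hlt | heq | hgt
  · have := pow_lt_pow_right₀ (show (1:Int) < p by omega) hlt
    omega
  · exact heq
  · have := pow_lt_pow_right₀ (show (1:Int) < p by omega) hgt
    omega

theorem pvUnique_aux (p a b : Int) (k l : Nat) (hp2 : 2 ≤ p) (hpa : ¬ p ∣ a) (hkl : k ≤ l) (h : a * p ^ k = b * p ^ l) : a = b ∧ k = l := by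
  have hsplit : b * p ^ l = (b * p ^ (l - k)) * p ^ k := by
    rw [mul_assoc, ← pow_add]
    congr 2
    omega
  rw [hsplit] at h
  have hab : a = b * p ^ (l - k) := mul_right_cancel₀ (pow_ne_zero k (by omega)) h
  rcases Nat.eq_or_lt_of_le hkl with heq | hlt
  · rw [heq] at hab ⊢
    simp at hab
    exact ⟨hab, rfl⟩
  · exfalso
    apply hpa
    rw [hab]
    exact Dvd.dvd.mul_left (dvd_pow_self p (by omega)) b

theorem pvUnique (p a b : Int) (k l : Nat) (hp2 : 2 ≤ p) (hpa : ¬ p ∣ a) (hpb : ¬ p ∣ b) (h : a * p ^ k = b * p ^ l) : a = b ∧ k = l := by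
  rcases Nat.le_total k l with hkl | hlk
  · exact pvUnique_aux p a b k l hp2 hpa hkl h
  · obtain ⟨h1, h2⟩ := pvUnique_aux p b a l k hp2 hpb hlk h.symm
    exact ⟨h1.symm, h2.symm⟩

theorem pvStep (m p e : Int) (he : 0 ≤ e) (hp2 : 2 ≤ p) (hpr : Prime p) (hpm : ¬ p ∣ m)
    (divs : List Int) (hnd : divs.Nodup) (hmem : ∀ d, d ∈ divs ↔ 0 < d ∧ d ∣ m) :
    (divs.flatMap (fun d => (PySem.List.pyRange 0 (e + 1) 1).map (fun k => d * p ^ k.toNat))).Nodup ∧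
    (∀ d, d ∈ divs.flatMap (fun d => (PySem.List.pyRange 0 (e + 1) 1).map (fun k => d * p ^ k.toNat)) ↔
      0 < d ∧ d ∣ m * p ^ e.toNat) := by
  have hnotp : ∀ a ∈ divs, ¬ p ∣ a := by
    intro a hadv hpa
    exact hpm (hpa.trans ((hmem a).1 hadv).2)
  have hpos : ∀ a ∈ divs, 0 < a := fun a hadv => ((hmem a).1 hadv).1
  constructor
  · rw [List.nodup_flatMap]
    constructor
    · intro a hadv
      refine List.Nodup.map_on ?_ (PySem.List.nodup_pyRange_one 0 (e + 1))
      intro k1 hk1 k2 hk2 heq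
      have ha0 : a ≠ 0 := by have := hpos a hadv; omega
      have := mul_left_cancel₀ ha0 heq
      have hk1' := (PySem.List.mem_pyRange_one).1 hk1
      have hk2' := (PySem.List.mem_pyRange_one).1 hk2
      have := pvPowInj p hp2 this
      omega
    · refine hnd.imp_of_mem ?_
      intro a b hadv hbdv hne x hxa hxb
      obtain ⟨k1, hk1, rfl⟩ := List.mem_map.1 hxa
      obtain ⟨k2, hk2, heq⟩ := List.mem_map.1 hxb
      have := pvUnique p a b k1.toNat k2.toNat hp2 (hnotp a hadv) (hnotp b hbdv) heq.symm
      exact hne this.1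
  · intro d
    constructor
    · intro hdm
      obtain ⟨a, hadv, hmm⟩ := List.mem_flatMap.1 hdm
      obtain ⟨k, hk, rfl⟩ := List.mem_map.1 hmm
      have hk' := (PySem.List.mem_pyRange_one).1 hk
      have ha := (hmem a).1 hadv
      refine ⟨mul_pos ha.1 (pow_pos (by omega) _), ?_⟩
      exact mul_dvd_mul ha.2 (pow_dvd_pow p (by omega))
    · rintro ⟨hd0, hdvd⟩
      obtain ⟨a, k, hadvd, hk, rfl⟩ := pvSplit m p hp2 hpr e.toNat d hd0 hdvd
      have ha0 : 0 < a := by nlinarith [pow_pos (show (0:Int) < p by omega) k]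
      refine List.mem_flatMap.2 ⟨a, (hmem a).2 ⟨ha0, hadvd⟩, List.mem_map.2 ⟨(k : Int), ?_, ?_⟩⟩
      · rw [PySem.List.mem_pyRange_one]
        omega
      · simp

theorem pvStrip_spec (fuel : Nat) : ∀ n p : Int, 2 ≤ p → 0 < n → n.toNat ≤ fuel →
    0 ≤ (pvStrip fuel n p).2 ∧ 0 < (pvStrip fuel n p).1 ∧
      n = (pvStrip fuel n p).1 * p ^ (pvStrip fuel n p).2.toNat ∧
      ¬ p ∣ (pvStrip fuel n p).1 := by
  induction fuel with
  | zero => intro n p hp hn hf; omega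
  | succ fuel ih =>
    intro n p hp hn hf
    by_cases hc : PySem.Int.mod n p = 0
    · rw [show pvStrip (fuel + 1) n p
          = ((pvStrip fuel (PySem.Int.floordiv n p) p).1,
             (pvStrip fuel (PySem.Int.floordiv n p) p).2 + 1) from by
        rw [pvStrip, if_pos hc]]
      have hp0 : 0 < p := by omega
      have hdvd : p ∣ n := (PySem.Int.mod_eq_zero_iff_dvd n p).1 hc
      have hnp : 0 < PySem.Int.floordiv n p := by
        rw [PySem.Int.floordiv_eq_ediv_of_pos hp0]
        have := Int.le_ediv_iff_mul_le (a := 1) (b := n) (c := p) hp0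
        have := Int.le_of_dvd hn hdvd
        omega
      have hlt : PySem.Int.floordiv n p < n := by
        rw [PySem.Int.floordiv_eq_ediv_of_pos hp0]
        rw [Int.ediv_lt_iff_lt_mul hp0]
        nlinarith
      obtain ⟨he, hpos, heq, hnd⟩ := ih (PySem.Int.floordiv n p) p hp hnp (by omega)
      refine ⟨by omega, hpos, ?_, hnd⟩
      have hmul : PySem.Int.floordiv n p * p = n := by
        rw [PySem.Int.floordiv_eq_ediv_of_pos hp0]
        exact Int.ediv_mul_cancel hdvd
      have ht : ((pvStrip fuel (PySem.Int.floordiv n p) p).2 + 1).toNat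
          = (pvStrip fuel (PySem.Int.floordiv n p) p).2.toNat + 1 := by omega
      dsimp only
      rw [ht, pow_succ, ← mul_assoc, ← heq, hmul]
    · rw [show pvStrip (fuel + 1) n p = (n, 0) from by rw [pvStrip, if_neg hc]]
      exact ⟨le_refl 0, hn, by simp,
        fun hdvd => hc ((PySem.Int.mod_eq_zero_iff_dvd n p).2 hdvd)⟩

theorem pvLoop_inv (fuel : Nat) : ∀ (divs : List Int) (n p m : Int),
    2 ≤ p → 0 < n → 0 < m → (n + 1 - p).toNat ≤ fuel →
    (∀ q : Int, 2 ≤ q → q < p → ¬ q ∣ n) →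
    IsCoprime m n →
    divs.Nodup → (∀ d, d ∈ divs ↔ 0 < d ∧ d ∣ m) →
    ∃ m', m' * (pvFactorLoop fuel divs n p).2 = m * n ∧ 0 < m' ∧
      (pvFactorLoop fuel divs n p).1.Nodup ∧
      (∀ d, d ∈ (pvFactorLoop fuel divs n p).1 ↔ 0 < d ∧ d ∣ m') ∧
      IsCoprime m' (pvFactorLoop fuel divs n p).2 ∧ 0 < (pvFactorLoop fuel divs n p).2 ∧
      ((pvFactorLoop fuel divs n p).2 = 1 ∨ Prime (pvFactorLoop fuel divs n p).2) := by
  induction fuel with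
  | zero =>
    intro divs n p m hp2 hn hm hf hmin hco hnd hmem
    rw [pvFactorLoop]
    refine ⟨m, rfl, hm, hnd, hmem, hco, hn, ?_⟩
    by_cases hn1 : n = 1
    · exact Or.inl hn1
    · refine Or.inr (pvResidual_prime n p hp2 (by omega) ?_ hmin)
      have hpn : n < p := by omega
      nlinarith
  | succ fuel ih =>
    intro divs n p m hp2 hn hm hf hmin hco hnd hmem
    rw [pvFactorLoop]
    by_cases hg : p * p ≤ n
    · rw [if_pos hg]
      by_cases hd : PySem.Int.mod n p = 0
      · rw [if_pos hd]
        have hpdvd : p ∣ n := (PySem.Int.mod_eq_zero_iff_dvd n p).1 hd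
        have hprime : Prime p := pvPrime_of_min p n hp2 hpdvd hmin
        obtain ⟨he, hn2pos, heq, hpn2⟩ :=
          pvStrip_spec n.toNat n p hp2 hn (le_refl _)
        have hpm : ¬ p ∣ m := by
          intro hpm
          exact hprime.not_unit (hco.isUnit_of_dvd' hpm hpdvd)
        obtain ⟨hnd', hmem'⟩ :=
          pvStep m p (pvStrip n.toNat n p).2 he hp2 hprime hpm divs hnd hmem
        have hn2dvd : (pvStrip n.toNat n p).1 ∣ n := ⟨p ^ (pvStrip n.toNat n p).2.toNat, heq⟩
        have hn2le : (pvStrip n.toNat n p).1 ≤ n := by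
          have hpe : (1:Int) ≤ p ^ (pvStrip n.toNat n p).2.toNat :=
            one_le_pow₀ (by omega)
          nlinarith
        have hmin' : ∀ q : Int, 2 ≤ q → q < p + 1 → ¬ q ∣ (pvStrip n.toNat n p).1 := by
          intro q hq2 hqp hqd
          rcases lt_or_eq_of_le (show q ≤ p by omega) with h | h
          · exact hmin q hq2 h (hqd.trans hn2dvd)
          · exact hpn2 (h ▸ hqd)
        have hco' : IsCoprime (m * p ^ (pvStrip n.toNat n p).2.toNat) (pvStrip n.toNat n p).1 := by
          refine IsCoprime.mul_left (hco.of_isCoprime_of_dvd_right hn2dvd) ?_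
          exact (((hprime.coprime_iff_not_dvd).2 hpn2)).pow_left
        have hplt : p < n := by nlinarith
        obtain ⟨m', hprod, hm'pos, h1, h2, h3, h4, h5⟩ :=
          ih _ (pvStrip n.toNat n p).1 (p + 1) (m * p ^ (pvStrip n.toNat n p).2.toNat)
            (by omega) hn2pos (mul_pos hm (pow_pos (by omega) _)) (by omega)
            hmin' hco' hnd' hmem'
        refine ⟨m', ?_, hm'pos, h1, h2, h3, h4, h5⟩
        rw [hprod]
        calc m * p ^ (pvStrip n.toNat n p).2.toNat * (pvStrip n.toNat n p).1
            = m * ((pvStrip n.toNat n p).1 * p ^ (pvStrip n.toNat n p).2.toNat) := by ring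
          _ = m * n := by rw [← heq]
      · rw [if_neg hd]
        have hplt : p < n := by nlinarith
        refine ih divs n (p + 1) m (by omega) hn hm (by omega) ?_ hco hnd hmem
        intro q hq2 hqp hqd
        rcases lt_or_eq_of_le (show q ≤ p by omega) with h | h
        · exact hmin q hq2 h hqd
        · exact hd ((PySem.Int.mod_eq_zero_iff_dvd n p).2 (h ▸ hqd))
    · rw [if_neg hg]
      refine ⟨m, rfl, hm, hnd, hmem, hco, hn, ?_⟩
      by_cases hn1 : n = 1
      · exact Or.inl hn1
      · exact Or.inr (pvResidual_prime n p hp2 (by omega) (by omega) hmin)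

theorem pvB_char (x : Int) (hx : 1 ≤ x) :
    ∃ L : List Int, enumerate_dividers_alt x = PySem.List.sorted L (fun y => y) false ∧
      L.Nodup ∧ (∀ d, d ∈ L ↔ 0 < d ∧ d ∣ x) := by
  obtain ⟨m', hprod, hm'pos, hnd, hmem, hco, hn'pos, hn'alt⟩ :=
    pvLoop_inv x.toNat [1] x 2 1 (by norm_num) (by omega) one_pos (by omega)
      (by intro q hq2 hqp hqd; omega)
      (isCoprime_one_left)
      (by simp)
      (by
        intro d
        simp only [List.mem_singleton]
        constructor
        · rintro rfl; exact ⟨one_pos, dvd_refl 1⟩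
        · rintro ⟨hd0, hd1⟩; exact Int.eq_one_of_dvd_one (by omega) hd1)
  refine ⟨if 1 < (pvFactorLoop x.toNat [1] x 2).2 then
      (pvFactorLoop x.toNat [1] x 2).1 ++ (pvFactorLoop x.toNat [1] x 2).1.map (fun d => d * (pvFactorLoop x.toNat [1] x 2).2)
    else (pvFactorLoop x.toNat [1] x 2).1, ?_, ?_, ?_⟩
  · unfold enumerate_dividers_alt
    rw [if_neg (by omega)]
  · -- Nodup
    rcases hn'alt with h1 | hpr
    · rw [h1, if_neg (by omega)]
      exact hnd
    · have h2 : 2 ≤ (pvFactorLoop x.toNat [1] x 2).2 := by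
        have := Int.prime_iff_natAbs_prime.1 hpr
        have := this.two_le
        omega
      rw [if_pos (by omega)]
      refine List.Nodup.append hnd (List.Nodup.map (mul_left_injective₀ (by omega)) hnd) ?_
      intro d hdl hdr
      obtain ⟨a, hal, rfl⟩ := List.mem_map.1 hdr
      have ha := (hmem a).1 hal
      have hd := (hmem _).1 hdl
      have hn'm : (pvFactorLoop x.toNat [1] x 2).2 ∣ m' :=
        (dvd_mul_left _ a).trans hd.2
      exact hpr.not_unit (hco.isUnit_of_dvd' hn'm (dvd_refl _))
  · -- membership
    intro d
    have hxeq : m' * (pvFactorLoop x.toNat [1] x 2).2 = x := by rw [hprod]; ring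
    rcases hn'alt with h1 | hpr
    · rw [h1, if_neg (by omega)]
      rw [hmem d]
      rw [h1, mul_one] at hxeq
      rw [hxeq]
    · have h2 : 2 ≤ (pvFactorLoop x.toNat [1] x 2).2 := by
        have := (Int.prime_iff_natAbs_prime.1 hpr).two_le
        omega
      have hpm' : ¬ (pvFactorLoop x.toNat [1] x 2).2 ∣ m' := by
        intro hdm
        exact hpr.not_unit (hco.isUnit_of_dvd' hdm (dvd_refl _))
      rw [if_pos (by omega)]
      constructor
      · intro hmem2
        rcases List.mem_append.1 hmem2 with h | h
        · have hd := (hmem d).1 h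
          exact ⟨hd.1, hd.2.trans (Dvd.intro _ (by rw [hxeq]))⟩
        · obtain ⟨a, hal, rfl⟩ := List.mem_map.1 h
          have ha := (hmem a).1 hal
          refine ⟨mul_pos ha.1 (by omega), ?_⟩
          have := mul_dvd_mul ha.2 (dvd_refl (pvFactorLoop x.toNat [1] x 2).2)
          rwa [hxeq] at this
      · rintro ⟨hd0, hdvd⟩
        have hdvd' : d ∣ m' * (pvFactorLoop x.toNat [1] x 2).2 ^ 1 := by
          rw [pow_one, hxeq]; exact hdvd
        obtain ⟨a, k, hadvd, hk, rfl⟩ := pvSplit m' (pvFactorLoop x.toNat [1] x 2).2 h2 hpr 1 d hd0 hdvd'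
        have ha0 : 0 < a := by nlinarith [pow_pos (show (0:Int) < (pvFactorLoop x.toNat [1] x 2).2 by omega) k]
        interval_cases k
        · refine List.mem_append.2 (Or.inl ?_)
          rw [pow_zero, mul_one]
          exact (hmem a).2 ⟨ha0, hadvd⟩
        · refine List.mem_append.2 (Or.inr (List.mem_map.2 ⟨a, (hmem a).2 ⟨ha0, hadvd⟩, ?_⟩))
          rw [pow_one]

def pvLA (x : Int) : List Int :=
  (PySem.List.pyRange 1 ((Nat.sqrt x.toNat : Int) + 1) 1).flatMap (fun i =>
    (if PySem.Int.mod x i = 0 then [i] else []) ++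
    (if PySem.Int.mod x i = 0 ∧ PySem.Int.floordiv x i ≠ i then [PySem.Int.floordiv x i] else []))

theorem pvA_flatMap (x : Int) (l : List Int) :
    l.foldl
      (fun result i =>
        if PySem.Int.mod x i = 0 then
          let result := result ++ [i]
          if PySem.Int.floordiv x i ≠ i then result ++ [PySem.Int.floordiv x i] else result
        else result) [] =
    l.flatMap (fun i =>
      (if PySem.Int.mod x i = 0 then [i] else []) ++
      (if PySem.Int.mod x i = 0 ∧ PySem.Int.floordiv x i ≠ i then [PySem.Int.floordiv x i] else [])) := by
  have hfun : (fun (result : List Int) i =>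
        if PySem.Int.mod x i = 0 then
          let result := result ++ [i]
          if PySem.Int.floordiv x i ≠ i then result ++ [PySem.Int.floordiv x i] else result
        else result) =
      (fun (acc : List Int) i => acc ++
        ((if PySem.Int.mod x i = 0 then [i] else []) ++
         (if PySem.Int.mod x i = 0 ∧ PySem.Int.floordiv x i ≠ i then [PySem.Int.floordiv x i] else []))) := by
    funext acc i
    by_cases h1 : PySem.Int.mod x i = 0 <;> by_cases h2 : PySem.Int.floordiv x i ≠ i <;>
      simp [h1, h2]
  rw [hfun]
  simpa using PySem.List.foldl_append_eq_flatMap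
      (g := fun i =>
        (if PySem.Int.mod x i = 0 then [i] else []) ++
        (if PySem.Int.mod x i = 0 ∧ PySem.Int.floordiv x i ≠ i then [PySem.Int.floordiv x i] else []))
      (l := l) (acc := ([] : List Int))

theorem pvA_eq_sorted (x : Int) :
    enumerate_dividers x = PySem.List.sorted (pvLA x) (fun y => y) false := by
  unfold enumerate_dividers pvLA
  rw [pvA_flatMap]

theorem pvFlatMap_append_perm {α β : Type} (u v : α → List β) (l : List α) :
    (l.flatMap (fun i => u i ++ v i)).Perm (l.flatMap u ++ l.flatMap v) := by
  induction l with
  | nil => simp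
  | cons a l ih =>
    simp only [List.flatMap_cons]
    have h1 : ((u a ++ v a) ++ l.flatMap (fun i => u i ++ v i)).Perm
        ((u a ++ v a) ++ (l.flatMap u ++ l.flatMap v)) := ih.append_left _
    refine h1.trans ?_
    simp only [List.append_assoc]
    refine List.Perm.append_left (u a) ?_
    have h2 : ((v a ++ l.flatMap u) ++ l.flatMap v).Perm ((l.flatMap u ++ v a) ++ l.flatMap v) :=
      (List.perm_append_comm).append_right _
    simpa [List.append_assoc] using h2

theorem pvFlatMap_if_filter {α : Type} (c : α → Prop) [DecidablePred c] (l : List α) :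
    l.flatMap (fun i => if c i then [i] else []) = l.filter (fun i => decide (c i)) := by
  induction l with
  | nil => rfl
  | cons a l ih => by_cases h : c a <;> simp [List.flatMap_cons, h, ih]

theorem pvFlatMap_if_filter_map {α β : Type} (c : α → Prop) [DecidablePred c] (f : α → β) (l : List α) :
    l.flatMap (fun i => if c i then [f i] else []) = (l.filter (fun i => decide (c i))).map f := by
  induction l with
  | nil => rfl
  | cons a l ih => by_cases h : c a <;> simp [List.flatMap_cons, h, ih]

theorem pvDivExact (x i : Int) (hi : 0 < i) (h : PySem.Int.mod x i = 0) :
    PySem.Int.floordiv x i * i = x := by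
  rw [PySem.Int.floordiv_eq_ediv_of_pos hi]
  have hd : i ∣ x := by
    rw [PySem.Int.mod_eq_emod_of_pos hi] at h
    exact Int.dvd_of_emod_eq_zero h
  exact Int.ediv_mul_cancel hd

theorem pvCross (x r a j : Int) (hr : r * r ≤ x)
    (ha1 : 1 ≤ a) (ha2 : a ≤ r) (_hj1 : 1 ≤ j) (hj2 : j ≤ r)
    (hdvd : PySem.Int.floordiv x j * j = x) (hne : PySem.Int.floordiv x j ≠ j) :
    a < PySem.Int.floordiv x j := by
  set d := PySem.Int.floordiv x j with hd
  by_contra hle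
  rw [Int.not_lt] at hle
  rcases lt_or_gt_of_ne hne with h | h
  · nlinarith
  · nlinarith

theorem pvLargeDec (x i j : Int) (hi1 : 1 ≤ i) (hij : i < j)
    (hdi : PySem.Int.floordiv x i * i = x) (hdj : PySem.Int.floordiv x j * j = x)
    (hx : 1 ≤ x) (_hj1 : 1 ≤ j) :
    PySem.Int.floordiv x j < PySem.Int.floordiv x i := by
  have hfj : 1 ≤ PySem.Int.floordiv x j := by nlinarith
  by_contra hle
  rw [Int.not_lt] at hle
  nlinarith

theorem pvSqrtBounds (x : Int) (hx : 0 ≤ x) :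
    (Nat.sqrt x.toNat : Int) * (Nat.sqrt x.toNat : Int) ≤ x ∧
      x < ((Nat.sqrt x.toNat : Int) + 1) * ((Nat.sqrt x.toNat : Int) + 1) := by
  constructor
  · have h : Nat.sqrt x.toNat * Nat.sqrt x.toNat ≤ x.toNat := by
      have := Nat.sqrt_le' x.toNat
      simpa [pow_two] using this
    have h2 : ((Nat.sqrt x.toNat * Nat.sqrt x.toNat : Nat) : Int) ≤ (x.toNat : Int) := by
      exact_mod_cast h
    rwa [Int.toNat_of_nonneg hx, Nat.cast_mul] at h2
  · have h : x.toNat < (Nat.sqrt x.toNat + 1) * (Nat.sqrt x.toNat + 1) := by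
      have := Nat.lt_succ_sqrt' x.toNat
      simpa [pow_two, Nat.succ_eq_add_one] using this
    have h2 : (x.toNat : Int) < (((Nat.sqrt x.toNat + 1) * (Nat.sqrt x.toNat + 1) : Nat) : Int) := by
      exact_mod_cast h
    rw [Int.toNat_of_nonneg hx] at h2
    push_cast at h2
    exact h2

theorem pvLA_nodup (x : Int) (hx : 0 ≤ x) : (pvLA x).Nodup := by
  unfold pvLA
  set r : Int := (Nat.sqrt x.toNat : Int) with hrdef
  have hrr : r * r ≤ x := by
    have h : Nat.sqrt x.toNat * Nat.sqrt x.toNat ≤ x.toNat := by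
      have := Nat.sqrt_le' x.toNat
      simpa [pow_two] using this
    have h2 : ((Nat.sqrt x.toNat * Nat.sqrt x.toNat : Nat) : Int) ≤ (x.toNat : Int) := by
      exact_mod_cast h
    rwa [Int.toNat_of_nonneg hx, Nat.cast_mul] at h2
  set R := PySem.List.pyRange 1 (r + 1) 1 with hR
  set P : Int → Prop := fun i => PySem.Int.mod x i = 0 with hP
  set Q : Int → Prop := fun i => PySem.Int.mod x i = 0 ∧ PySem.Int.floordiv x i ≠ i with hQ
  set f : Int → Int := fun i => PySem.Int.floordiv x i with hf
  set ys := R.filter (fun i => decide (P i)) ++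
      ((R.filter (fun i => decide (Q i))).map f).reverse with hys
  have hmemR : ∀ i ∈ R, 1 ≤ i ∧ i ≤ r := by
    intro i hiR
    have := (PySem.List.mem_pyRange_one).1 hiR
    omega
  have hperm : ys.Perm (R.flatMap (fun i =>
      (if P i then [i] else []) ++ (if Q i then [f i] else []))) := by
    have h1 := pvFlatMap_append_perm (fun i => if P i then [i] else [])
        (fun i => if Q i then [f i] else []) R
    rw [pvFlatMap_if_filter P R, pvFlatMap_if_filter_map Q f R] at h1
    refine List.Perm.symm (h1.trans ?_)
    exact List.Perm.append_left _ ((R.filter (fun i => decide (Q i))).map f).reverse_perm.symm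
  have hsorted : ys.Pairwise (fun a b => a < b) := by
    rw [hys, List.pairwise_append]
    refine ⟨?_, ?_, ?_⟩
    · exact (PySem.List.pairwise_lt_pyRange_one 1 (r+1)).filter _
    · rw [List.pairwise_reverse]
      have hpw : (R.filter (fun i => decide (Q i))).Pairwise (fun a b => a < b) :=
        (PySem.List.pairwise_lt_pyRange_one 1 (r+1)).filter _
      rw [List.pairwise_map]
      refine hpw.imp_of_mem ?_
      intro a b hma hmb hab
      have ha := hmemR a (List.mem_of_mem_filter hma)
      have hb := hmemR b (List.mem_of_mem_filter hmb)
      have hQa : Q a := by simpa using List.of_mem_filter hma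
      have hQb : Q b := by simpa using List.of_mem_filter hmb
      have hda := pvDivExact x a (by omega) hQa.1
      have hdb := pvDivExact x b (by omega) hQb.1
      have hx1 : 1 ≤ x := by nlinarith [ha.1, ha.2, hrr]
      exact pvLargeDec x a b ha.1 hab hda hdb hx1 hb.1
    · intro a hma b hmb
      simp only [List.mem_reverse, List.mem_map] at hmb
      obtain ⟨j, hjm, rfl⟩ := hmb
      have ha := hmemR a (List.mem_of_mem_filter hma)
      have hj := hmemR j (List.mem_of_mem_filter hjm)
      have hQj : Q j := by simpa using List.of_mem_filter hjm
      have hdj := pvDivExact x j (by omega) hQj.1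
      exact pvCross x r a j hrr ha.1 ha.2 hj.1 hj.2 hdj hQj.2
  have hysnd : ys.Nodup := hsorted.imp (fun h => ne_of_lt h)
  exact hperm.nodup hysnd

theorem pvLA_mem (x : Int) (hx : 1 ≤ x) (d : Int) :
    d ∈ pvLA x ↔ 0 < d ∧ d ∣ x := by
  obtain ⟨hrr, hrs⟩ := pvSqrtBounds x (by omega)
  set r : Int := (Nat.sqrt x.toNat : Int) with hrdef
  constructor
  · intro hmem
    obtain ⟨i, hiR, hblk⟩ := List.mem_flatMap.1 hmem
    have hi := (PySem.List.mem_pyRange_one).1 hiR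
    rcases List.mem_append.1 hblk with h | h
    · by_cases hc : PySem.Int.mod x i = 0
      · rw [if_pos hc] at h
        rw [List.mem_singleton] at h
        subst h
        exact ⟨by omega, (PySem.Int.mod_eq_zero_iff_dvd x d).1 hc⟩
      · rw [if_neg hc] at h
        exact absurd h (List.not_mem_nil)
    · by_cases hc : PySem.Int.mod x i = 0 ∧ PySem.Int.floordiv x i ≠ i
      · rw [if_pos hc] at h
        rw [List.mem_singleton] at h
        subst h
        have hde := pvDivExact x i (by omega) hc.1
        refine ⟨?_, Dvd.intro i hde⟩
        nlinarith
      · rw [if_neg hc] at h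
        exact absurd h (List.not_mem_nil)
  · rintro ⟨hd0, hdvd⟩
    obtain ⟨c, hc⟩ := hdvd
    have hc0 : 0 < c := by nlinarith
    rcases le_or_gt d r with hdr | hdr
    · refine List.mem_flatMap.2 ⟨d, ?_, ?_⟩
      · rw [PySem.List.mem_pyRange_one]; omega
      · refine List.mem_append.2 (Or.inl ?_)
        rw [if_pos ((PySem.Int.mod_eq_zero_iff_dvd x d).2 ⟨c, hc⟩)]
        exact List.mem_singleton.2 rfl
    · -- d > r: use i = c
      have hcr : c ≤ r := by nlinarith
      have hcd : c < d := by omega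
      have hcdvd : c ∣ x := Dvd.intro d (by rw [hc, mul_comm])
      have hfl : PySem.Int.floordiv x c = d := by
        rw [PySem.Int.floordiv_eq_ediv_of_pos hc0, hc, Int.mul_ediv_cancel d (by omega)]
      refine List.mem_flatMap.2 ⟨c, ?_, ?_⟩
      · rw [PySem.List.mem_pyRange_one]; omega
      · refine List.mem_append.2 (Or.inr ?_)
        rw [if_pos ⟨(PySem.Int.mod_eq_zero_iff_dvd x c).2 hcdvd, by rw [hfl]; omega⟩]
        rw [hfl]
        exact List.mem_singleton.2 rfl

theorem pvMain (x : Int) (hpre : 0 ≤ x) :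
    enumerate_dividers x = enumerate_dividers_alt x := by
  by_cases hx0 : x = 0
  · subst hx0
    decide
  · obtain ⟨L, hBeq, hLnd, hLmem⟩ := pvB_char x (by omega)
    rw [hBeq, pvA_eq_sorted]
    refine PySem.List.sorted_eq_sorted_of_perm _ _ _ (fun a b h => h) ?_
    refine (List.perm_ext_iff_of_nodup (pvLA_nodup x hpre) hLnd).2 ?_
    intro d
    rw [pvLA_mem x (by omega) d, hLmem d]

-- ===== VERDICT (by name: the statement is the Claim_ definition above) =====
theorem enumerate_dividers_spec : Claim_equal_enumerate_dividers := by
  intro x _ hpre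
  exact pvMain x hpre
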